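-- pv_equiv track=rewrite | github.com/mattvenn/mpw1-bringup | sw/control.py | _build_io_config
-- ===== SOURCE A (Python) =====
-- def _build_io_config(bits):
-- 	# Empty vector
-- 	v = [0 for i in range(38*13)]
--
-- 	# Set bits
-- 	for b in bits:
-- 		v[b] = 1
--
-- 	# Build each io config
-- 	rv = {}
--
-- 	for i in range(38):
-- 		ioc = sum([(bv << bn) for bn, bv in enumerate(v[13*i:13*(i+1)])])
-- 		if ioc:
-- 			rv[f'IOCONF_VAL_{i}'] = f'0x{ioc:04x}'
--
-- 	return rv
-- ===== SOURCE B (Python) =====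
-- def _build_io_config(bits):
-- 	# 38 per-group accumulators: each bit lands in group b // 13 at offset b % 13.
-- 	groups = [0] * 38
-- 	for b in bits:
-- 		q, r = divmod(b, 13)
-- 		groups[q] |= 1 << r
-- 	return {f'IOCONF_VAL_{i}': f'0x{m:04x}' for i, m in enumerate(groups) if m}
-- ===== Notes on version B (the rewrite author's own statement) =====
-- stated objective: simpler
-- what changed: B drops A's 494-element bit vector and the per-group slice/enumerate bit-sums: a single pass keeps 38 per-group accumulator ints indexed by b//13, OR-ing in 1<<(b%13), and the result is a comprehension over the nonzero accumulators.
import Mathlib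
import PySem

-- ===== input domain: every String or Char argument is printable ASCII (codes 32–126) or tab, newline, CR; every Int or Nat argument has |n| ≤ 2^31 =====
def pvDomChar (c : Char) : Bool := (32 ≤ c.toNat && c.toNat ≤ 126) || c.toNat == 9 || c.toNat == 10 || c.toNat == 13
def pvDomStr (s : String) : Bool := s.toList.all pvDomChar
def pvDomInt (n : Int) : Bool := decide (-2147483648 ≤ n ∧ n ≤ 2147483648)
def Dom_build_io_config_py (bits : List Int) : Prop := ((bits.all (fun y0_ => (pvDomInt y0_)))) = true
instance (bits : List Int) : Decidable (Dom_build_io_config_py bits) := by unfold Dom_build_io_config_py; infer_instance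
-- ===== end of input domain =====

-- B replaces A's 494-element bit vector and per-group slice/enumerate bit-sums by a single pass
-- over the bits that ORs 1 << (b % 13) into one of 38 per-group accumulators (objective: simpler).

-- shared formatting helper: hand-written port of f'0x{n:04x}', exact for 0 ≤ n < 65536
def hexDigit (n : Nat) : Char := if n < 10 then Char.ofNat (48 + n) else Char.ofNat (87 + n)
def hex4 (n : Int) : String :=
  String.ofList ['0', 'x', hexDigit (n.toNat / 4096 % 16), hexDigit (n.toNat / 256 % 16),
             hexDigit (n.toNat / 16 % 16), hexDigit (n.toNat % 16)]

-- ===== PORT A =====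
def build_io_config_py (bits : List Int) : List (String × String) :=
  -- v = [0 for i in range(38*13)]
  let v0 : List Int := (PySem.List.pyRange 0 (38 * 13) 1).map (fun _ => 0)
  -- for b in bits: v[b] = 1   (pySetD is exact under Pre_: every b is in range)
  let v : List Int := bits.foldl (fun v b => PySem.List.pySetD v b 1) v0
  -- for i in range(38): ioc = sum([(bv << bn) for bn, bv in enumerate(v[13*i:13*(i+1)])]); if ioc: rv[...] = ...
  let rv : PySem.Dict String String :=
    (PySem.List.pyRange 0 38 1).foldl (fun rv i =>
      let ioc : Int :=
        ((PySem.List.enumerate (PySem.List.slice v (some (13 * i)) (some (13 * (i + 1))))).map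
          (fun p => p.2 <<< p.1.toNat)).sum
      if ioc ≠ 0 then rv.insert ("IOCONF_VAL_" ++ PySem.Int.toStr i) (hex4 ioc) else rv)
      PySem.Dict.empty
  rv.items

-- ===== PORT B =====
def build_io_config_py_alt (bits : List Int) : List (String × String) :=
  -- groups = [0] * 38; for b in bits: q, r = divmod(b, 13); groups[q] |= 1 << r
  -- (pyGetD/pySetD are exact under Pre_: every q is a valid index of the 38-element list)
  let groups : List Int := bits.foldl (fun g b =>
    let q := PySem.Int.floordiv b 13
    let r := PySem.Int.mod b 13
    PySem.List.pySetD g q (PySem.Int.bor (PySem.List.pyGetD g q 0) ((1 : Int) <<< r.toNat)))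
    (List.replicate 38 0)
  -- {f'IOCONF_VAL_{i}': f'0x{m:04x}' for i, m in enumerate(groups) if m}
  -- (the keys are pairwise distinct, so the dict's item list is exactly this list)
  ((PySem.List.enumerate groups).filter (fun p => p.2 != 0)).map
    (fun p => ("IOCONF_VAL_" ++ PySem.Int.toStr p.1, hex4 p.2))

-- ===== PRECONDITION & SPEC =====
-- Pre_ excludes exactly the inputs on which A raises IndexError (a bit index outside [-494, 494));
-- B raises IndexError on exactly the same inputs (groups[b // 13] is in range iff b is).
def Pre_build_io_config_py (bits : List Int) : Prop := ∀ b ∈ bits, -494 ≤ b ∧ b < 494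
instance (bits : List Int) : Decidable (Pre_build_io_config_py bits) := by
  unfold Pre_build_io_config_py; infer_instance
def pvWitness_build_io_config_py : List Int := [0, 5, -1, 100, 13, 13]

def Spec_build_io_config_py (bits : List Int) (out : List (String × String)) : Prop :=
  out = build_io_config_py_alt bits
instance (bits : List Int) (out : List (String × String)) : Decidable (Spec_build_io_config_py bits out) := by
  unfold Spec_build_io_config_py; infer_instance

-- ===== CLAIM (what is proved, stated in full; the proofs are below) =====
def Claim_equal_build_io_config_py : Prop :=
  ∀ (bits : List Int), Dom_build_io_config_py bits → Pre_build_io_config_py bits →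
    Spec_build_io_config_py bits (build_io_config_py bits)

-- ===== LEMMAS AND PROOFS =====

-- the normalized bit indices (python list index semantics for length 494: b % 494 on -494 ≤ b < 494)
def pvNorm (bits : List Int) : List Int := bits.map (fun b => PySem.Int.mod b 494)

-- the 13-bit indicator mask of group i, as a natural number
def pvSumN (f : Nat → Bool) (k : Nat) : Nat := ((List.range k).map (fun n => if f n then 2 ^ n else 0)).sum

-- the value of group i given the list L of normalized set-bit indices
def pvMask (i : Nat) (L : List Int) : Int :=
  ((pvSumN (fun n => decide ((((13 * i + n : Nat)) : Int) ∈ L)) 13 : Nat) : Int)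

lemma pvSumN_congr (f g : Nat → Bool) (k : Nat) (h : ∀ n < k, f n = g n) :
    pvSumN f k = pvSumN g k := by
  unfold pvSumN
  exact congrArg List.sum (List.map_congr_left (fun n hn => by rw [h n (List.mem_range.mp hn)]))

lemma pvSumN_lt (f : Nat → Bool) (k : Nat) : pvSumN f k < 2 ^ k := by
  induction k with
  | zero => simp [pvSumN]
  | succ k ih =>
    unfold pvSumN at *
    rw [List.range_succ, List.map_append, List.sum_append]
    simp only [List.map_cons, List.map_nil, List.sum_cons, List.sum_nil, add_zero]
    have : (if f k then 2 ^ k else 0) ≤ 2 ^ k := by split <;> simp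
    have h2 : 2 ^ (k + 1) = 2 ^ k + 2 ^ k := by ring
    omega

lemma pvSumN_testBit (f : Nat → Bool) (k j : Nat) :
    (pvSumN f k).testBit j = (decide (j < k) && f j) := by
  induction k with
  | zero => simp [pvSumN]
  | succ k ih =>
    have hsplit : pvSumN f (k + 1) = pvSumN f k + (if f k then 2 ^ k else 0) := by
      unfold pvSumN
      rw [List.range_succ, List.map_append, List.sum_append]
      simp
    rw [hsplit]
    by_cases hf : f k
    · rw [if_pos hf]
      rcases lt_trichotomy j k with hj | hj | hj
      · rw [Nat.add_comm, Nat.testBit_two_pow_add_gt hj, ih]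
        simp [hj, Nat.lt_succ_of_lt hj]
      · subst hj
        rw [Nat.add_comm, Nat.testBit_two_pow_add_eq, ih]
        simp [hf]
      · have hlt : pvSumN f k + 2 ^ k < 2 ^ j := by
          have h1 := pvSumN_lt f k
          have h2 : 2 ^ (k + 1) ≤ 2 ^ j := Nat.pow_le_pow_right (by norm_num) hj
          have h3 : 2 ^ (k + 1) = 2 ^ k + 2 ^ k := by ring
          omega
        rw [Nat.testBit_lt_two_pow hlt]
        simp; omega
    · rw [if_neg hf, Nat.add_zero, ih]
      by_cases hj : j = k
      · subst hj; simp [hf]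
      · by_cases hjk : j < k
        · simp [hjk, Nat.lt_succ_of_lt hjk]
        · have : ¬ j < k + 1 := by omega
          simp [hjk, this]

lemma pvSumN_or (f : Nat → Bool) (r : Nat) (hr : r < 13) :
    pvSumN f 13 ||| 2 ^ r = pvSumN (fun n => f n || decide (n = r)) 13 := by
  apply Nat.eq_of_testBit_eq
  intro j
  rw [Nat.testBit_or, pvSumN_testBit, pvSumN_testBit, Nat.testBit_two_pow]
  by_cases hj : j = r
  · subst hj; simp [hr]
  · simp [hj]
    intro h
    exact absurd h.symm hj

-- casting helper
lemma pv_one_shl (k : Nat) : ((1 : Int) <<< k) = (((2 ^ k : Nat)) : Int) := by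
  rw [Int.shiftLeft_eq]; push_cast; ring

-- pvMask as the Int-valued indicator sum used on the A side
lemma pvMask_eq_indSum (i : Nat) (L : List Int) :
    pvMask i L
    = ((List.range 13).map (fun (n : Nat) => if ((13 * (i : Int) + (n : Int)) ∈ L) then ((1 : Int) <<< n) else 0)).sum := by
  unfold pvMask pvSumN
  rw [Nat.cast_list_sum, List.map_map]
  apply congrArg List.sum
  apply List.map_congr_left
  intro n _
  simp only [Function.comp_apply]
  have hc : (((13 * i + n : Nat)) : Int) = 13 * (i : Int) + (n : Int) := by push_cast; ring
  simp only [hc]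
  by_cases h : (13 * (i : Int) + (n : Int)) ∈ L
  · simp [h, pv_one_shl]
  · simp [h]

-- ===== A-side lemmas =====

lemma pv_set_mapRange (N : Nat) (g : Nat → Int) (k : Nat) (x : Int) :
    ((List.range N).map g).set k x = (List.range N).map (fun j => if j = k then x else g j) := by
  apply List.ext_getElem
  · simp
  · intro j h1 h2
    simp only [List.getElem_set, List.getElem_map, List.getElem_range]
    by_cases h : k = j
    · simp [h]
    · rw [if_neg h, if_neg (fun hh => h hh.symm)]

lemma pv_pyIdx_mod (N : Nat) (hN : 0 < N) (b : Int) (hb : -(N : Int) ≤ b ∧ b < N) :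
    PySem.List.pyIdx? N b = some (PySem.Int.mod b N).toNat := by
  have hNpos : (0 : Int) < N := by exact_mod_cast hN
  have hm : PySem.Int.mod b N = b % N := PySem.Int.mod_eq_emod_of_pos hNpos
  by_cases h0 : 0 ≤ b
  · have hb' : b % N = b := Int.emod_eq_of_lt h0 hb.2
    simp only [PySem.List.pyIdx?, if_pos h0, if_pos hb.2, Option.some.injEq]
    rw [hm, hb']
  · have hbN : b % N = b + N := by
      have h1 : (b + N) % N = b + N := Int.emod_eq_of_lt (by omega) (by omega)
      have h2 : (b + N) % N = b % N := Int.add_emod_right b N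
      omega
    have : ¬ (0 : Int) ≤ b := h0
    simp only [PySem.List.pyIdx?, if_neg this, hm, hbN]
    rw [if_pos (by omega)]
    congr 1
    omega

lemma pv_setD_mapRange (N : Nat) (hN : 0 < N) (g : Nat → Int) (b x : Int)
    (hb : -(N : Int) ≤ b ∧ b < N) :
    PySem.List.pySetD ((List.range N).map g) b x
    = (List.range N).map (fun (j : Nat) => if (j : Int) = PySem.Int.mod b N then x else g j) := by
  have hNpos : (0 : Int) < N := by exact_mod_cast hN
  have hmodnn : 0 ≤ PySem.Int.mod b N := PySem.Int.mod_nonneg b hNpos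
  have hmcast : ((PySem.Int.mod b N).toNat : Int) = PySem.Int.mod b N := Int.toNat_of_nonneg hmodnn
  have hidx : PySem.List.pyIdx? N b = some (PySem.Int.mod b N).toNat := pv_pyIdx_mod N hN b hb
  show PySem.List.pySetD _ b x = _
  unfold PySem.List.pySetD PySem.List.pySet?
  rw [show ((List.range N).map g).length = N by simp, hidx]
  simp only [Option.map_some, Option.getD_some]
  rw [pv_set_mapRange N g (PySem.Int.mod b N).toNat x]
  apply List.map_congr_left
  intro j hj
  by_cases h : j = (PySem.Int.mod b N).toNat
  · rw [if_pos h, if_pos (by rw [← hmcast, Int.natCast_inj]; exact h)]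
  · rw [if_neg h, if_neg (by rw [← hmcast, Int.natCast_inj]; exact h)]

set_option maxRecDepth 8192 in
lemma pv_setLoop (bits : List Int) (h : ∀ b ∈ bits, -494 ≤ b ∧ b < 494) (g : Nat → Int) :
    bits.foldl (fun v b => PySem.List.pySetD v b 1) ((List.range 494).map g)
    = (List.range 494).map (fun (j : Nat) => if ((j : Int) ∈ pvNorm bits) then 1 else g j) := by
  induction bits generalizing g with
  | nil => simp [pvNorm]
  | cons b bits ih =>
    simp only [List.foldl_cons]
    rw [pv_setD_mapRange 494 (by norm_num) g b 1 (by exact_mod_cast h b (by simp))]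
    rw [ih (fun b hb => h b (by simp [hb])) _]
    apply List.map_congr_left
    intro j hj
    simp only [pvNorm, List.map_cons, List.mem_cons]
    split_ifs <;> first | rfl | tauto

lemma pv_slice_mapRange (F : Nat → Int) (a : Nat) (h : a + 13 ≤ 494) :
    PySem.List.slice ((List.range 494).map F) (some (a : Int)) (some ((a : Int) + 13))
    = (List.range' a 13).map F := by
  rw [show ((a : Int) + 13) = ((a + 13 : Nat) : Int) by push_cast; ring, PySem.List.slice_natCast]
  apply List.ext_getElem
  · simp; omega
  · intro n h1 h2
    have hn : n < 13 := by simpa using h2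
    simp [List.getElem_take, List.getElem_drop, List.getElem_range']

lemma pv_enumSum13 (F : Nat → Int) (a : Nat) :
    ((PySem.List.enumerate ((List.range' a 13).map F)).map (fun p => p.2 <<< p.1.toNat)).sum
    = ((List.range 13).map (fun n => F (a + n) <<< n)).sum := by
  norm_num [List.range', PySem.List.enumerate_cons, PySem.List.enumerate_nil, List.range_succ]
  norm_num [show Int.toNat 2 = 2 from rfl, show Int.toNat 3 = 3 from rfl, show Int.toNat 4 = 4 from rfl, show Int.toNat 5 = 5 from rfl, show Int.toNat 6 = 6 from rfl, show Int.toNat 7 = 7 from rfl, show Int.toNat 8 = 8 from rfl, show Int.toNat 9 = 9 from rfl, show Int.toNat 10 = 10 from rfl, show Int.toNat 11 = 11 from rfl, show Int.toNat 12 = 12 from rfl]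

-- A's per-group value is pvMask
lemma pv_ioc_eq (bits : List Int) (hpre : Pre_build_io_config_py bits) (i : Int)
    (hi : i ∈ PySem.List.pyRange 0 38 1) :
    ((PySem.List.enumerate (PySem.List.slice
        (bits.foldl (fun v b => PySem.List.pySetD v b 1) ((PySem.List.pyRange 0 (38 * 13) 1).map (fun _ => (0 : Int))))
        (some (13 * i)) (some (13 * (i + 1))))).map (fun p => p.2 <<< p.1.toNat)).sum
    = pvMask i.toNat (pvNorm bits) := by
  obtain ⟨hi0, hi38⟩ := PySem.List.mem_pyRange_one.mp hi
  have him : (i.toNat : Int) = i := Int.toNat_of_nonneg hi0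
  have hm38 : i.toNat < 38 := by omega
  have hv0 : (PySem.List.pyRange 0 (38 * 13) 1).map (fun _ => (0 : Int))
      = (List.range 494).map (fun _ => (0 : Int)) := by
    set_option maxRecDepth 10000 in rfl
  rw [hv0, pv_setLoop bits hpre (fun _ => 0)]
  have h1 : (13 : Int) * i = ((13 * i.toNat : Nat) : Int) := by push_cast; omega
  have h2 : (13 : Int) * (i + 1) = ((13 * i.toNat : Nat) : Int) + 13 := by push_cast; omega
  rw [h1, h2, pv_slice_mapRange _ (13 * i.toNat) (by omega), pv_enumSum13, pvMask_eq_indSum]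
  apply congrArg List.sum
  apply List.map_congr_left
  intro n hn
  have hcast : ((13 * i.toNat + n : Nat) : Int) = 13 * (i.toNat : Int) + (n : Int) := by push_cast; ring
  by_cases hin : (13 * (i.toNat : Int) + (n : Int)) ∈ pvNorm bits
  · rw [if_pos (by rw [hcast]; exact hin), if_pos hin]
  · rw [if_neg (by rw [hcast]; exact hin), if_neg hin]
    norm_num [Int.shiftLeft_eq]

-- ===== B-side lemmas =====

lemma pv_getD_mapRange (N : Nat) (hN : 0 < N) (g : Nat → Int) (b d : Int)
    (hb : -(N : Int) ≤ b ∧ b < N) :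
    PySem.List.pyGetD ((List.range N).map g) b d = g (PySem.Int.mod b N).toNat := by
  have hNpos : (0 : Int) < N := by exact_mod_cast hN
  have hmodnn : 0 ≤ PySem.Int.mod b N := PySem.Int.mod_nonneg b hNpos
  have hmlt : PySem.Int.mod b N < N := PySem.Int.mod_lt b hNpos
  have hidx : PySem.List.pyIdx? N b = some (PySem.Int.mod b N).toNat := pv_pyIdx_mod N hN b hb
  unfold PySem.List.pyGetD PySem.List.pyGet?
  rw [show ((List.range N).map g).length = N by simp, hidx]
  have hlt : (PySem.Int.mod b N).toNat < N := by omega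
  simp [hlt]

-- one step of B's loop on the characterized state
set_option maxHeartbeats 1000000 in
lemma pvB_step (L : List Int) (b : Int) (hb : -494 ≤ b ∧ b < 494) :
    (PySem.List.pySetD ((List.range 38).map (fun i => pvMask i L)) (PySem.Int.floordiv b 13)
      (PySem.Int.bor (PySem.List.pyGetD ((List.range 38).map (fun i => pvMask i L)) (PySem.Int.floordiv b 13) 0)
        ((1 : Int) <<< (PySem.Int.mod b 13).toNat)))
    = (List.range 38).map (fun i => pvMask i (L ++ [PySem.Int.mod b 494])) := by
  have h13 : (0 : Int) < 13 := by norm_num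
  have h38 : (0 : Int) < 38 := by norm_num
  have hr0 : 0 ≤ PySem.Int.mod b 13 := PySem.Int.mod_nonneg b h13
  have hr13 : PySem.Int.mod b 13 < 13 := PySem.Int.mod_lt b h13
  have hdm : PySem.Int.floordiv b 13 * 13 + PySem.Int.mod b 13 = b := PySem.Int.floordiv_mul_add_mod b 13
  have hq0 : -38 ≤ PySem.Int.floordiv b 13 := by omega
  have hq38 : PySem.Int.floordiv b 13 < 38 := by omega
  have hm38nn : 0 ≤ PySem.Int.mod (PySem.Int.floordiv b 13) 38 :=
    PySem.Int.mod_nonneg (PySem.Int.floordiv b 13) h38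
  have hm38lt : PySem.Int.mod (PySem.Int.floordiv b 13) 38 < 38 :=
    PySem.Int.mod_lt (PySem.Int.floordiv b 13) h38
  have hqncast : (((PySem.Int.mod (PySem.Int.floordiv b 13) 38).toNat : Nat) : Int)
      = PySem.Int.mod (PySem.Int.floordiv b 13) 38 := Int.toNat_of_nonneg hm38nn
  have hkey : PySem.Int.mod b 494
      = 13 * (((PySem.Int.mod (PySem.Int.floordiv b 13) 38).toNat : Nat) : Int) + PySem.Int.mod b 13 := by
    rw [hqncast, PySem.Int.mod_eq_emod_of_pos h38,
        PySem.Int.mod_eq_emod_of_pos (show (0 : Int) < 494 by norm_num)]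
    omega
  rw [pv_getD_mapRange 38 (by norm_num) _ (PySem.Int.floordiv b 13) 0 ⟨by omega, by omega⟩]
  rw [pv_setD_mapRange 38 (by norm_num) _ (PySem.Int.floordiv b 13) _ ⟨by omega, by omega⟩]
  rw [hkey]
  simp only [Nat.cast_ofNat]
  apply List.map_congr_left
  intro j hj
  have hj38 : j < 38 := List.mem_range.mp hj
  by_cases hcase : (j : Int) = PySem.Int.mod (PySem.Int.floordiv b 13) 38
  · rw [if_pos hcase]
    have hjqn : j = (PySem.Int.mod (PySem.Int.floordiv b 13) 38).toNat := by omega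
    rw [← hjqn] at hkey ⊢
    unfold pvMask
    rw [pv_one_shl, PySem.Int.bor_natCast,
        pvSumN_or _ (PySem.Int.mod b 13).toNat (by omega)]
    congr 1
    apply pvSumN_congr
    intro n hn
    have hx : ((((13 * j + n : Nat)) : Int) = 13 * (j : Int) + PySem.Int.mod b 13) ↔ (n = (PySem.Int.mod b 13).toNat) := by
      push_cast
      omega
    simp only [List.mem_append, List.mem_singleton, Bool.decide_or]
    congr 1
    rw [decide_eq_decide]
    exact hx.symm
  · rw [if_neg hcase]
    unfold pvMask
    congr 1
    apply pvSumN_congr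
    intro n hn
    have hne : (((13 * j + n : Nat)) : Int)
        ≠ 13 * (((PySem.Int.mod (PySem.Int.floordiv b 13) 38).toNat : Nat) : Int) + PySem.Int.mod b 13 := by
      push_cast
      omega
    rw [decide_eq_decide, List.mem_append, List.mem_singleton]
    constructor
    · exact Or.inl
    · rintro (h | h)
      · exact h
      · exact absurd h hne

-- B's loop computes the per-group masks
lemma pvB_fold (bits : List Int) (hpre : ∀ b ∈ bits, -494 ≤ b ∧ b < 494) (L : List Int) :
    bits.foldl (fun g b =>
        PySem.List.pySetD g (PySem.Int.floordiv b 13)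
          (PySem.Int.bor (PySem.List.pyGetD g (PySem.Int.floordiv b 13) 0)
            ((1 : Int) <<< (PySem.Int.mod b 13).toNat)))
      ((List.range 38).map (fun i => pvMask i L))
    = (List.range 38).map (fun i => pvMask i (L ++ pvNorm bits)) := by
  induction bits generalizing L with
  | nil => simp [pvNorm]
  | cons b bits ih =>
    simp only [List.foldl_cons]
    rw [pvB_step L b (hpre b (by simp)), ih (fun x hx => hpre x (by simp [hx]))]
    simp [pvNorm]

lemma pvB_init : (List.replicate 38 (0 : Int)) = (List.range 38).map (fun i => pvMask i []) := by
  apply List.ext_getElem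
  · simp
  · intro j h1 h2
    simp [pvMask, pvSumN]

-- ===== items assembly =====

-- conditional insertion of fresh distinct keys appends, in order
lemma pv_items_condfold (l : List Int) (key : Int → String) (val : Int → String) (c : Int → Int)
    (d : PySem.Dict String String)
    (hfresh : ∀ i ∈ l, d.contains (key i) = false)
    (hnd : (l.map key).Nodup) :
    (l.foldl (fun rv i => if c i ≠ 0 then rv.insert (key i) (val i) else rv) d).items
    = d.items ++ (l.filter (fun i => c i != 0)).map (fun i => (key i, val i)) := by
  induction l generalizing d with
  | nil => simp
  | cons i l ih =>
    have hnd' : (key i ∉ l.map key) ∧ (l.map key).Nodup := by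
      rw [List.map_cons, List.nodup_cons] at hnd
      exact hnd
    obtain ⟨hhead, hndl⟩ := hnd'
    simp only [List.foldl_cons, List.filter_cons]
    by_cases hc : c i ≠ 0
    · have hci : (c i != 0) = true := by simp [bne_iff_ne]; exact hc
      rw [if_pos hc, hci]
      rw [ih (d.insert (key i) (val i))
          (by
            intro a ha
            rw [PySem.Dict.contains_insert]
            have h1 : (key a == key i) = false := by
              simp only [beq_eq_false_iff_ne, ne_eq]
              intro hh
              exact hhead (hh ▸ List.mem_map_of_mem ha)
            rw [h1, hfresh a (List.mem_cons_of_mem _ ha)]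
            rfl)
          hndl]
      rw [PySem.Dict.items_insert_of_not_contains _ (val i) (hfresh i (List.mem_cons_self ..))]
      simp
    · have hci : (c i != 0) = false := by simp [bne]; simpa using hc
      rw [if_neg hc, hci]
      exact ih d (fun a ha => hfresh a (List.mem_cons_of_mem _ ha)) hndl

lemma pv_enum_mapRange (N : Nat) (F : Nat → Int) :
    PySem.List.enumerate ((List.range N).map F) = (List.range N).map (fun (j : Nat) => ((j : Int), F j)) := by
  apply List.ext_getElem
  · simp [PySem.List.length_enumerate]
  · intro k h1 h2
    rw [PySem.List.getElem_enumerate]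
    simp

set_option maxRecDepth 8192 in
lemma pv_keys_nodup :
    ((PySem.List.pyRange 0 38 1).map (fun i => "IOCONF_VAL_" ++ PySem.Int.toStr i)).Nodup := by
  decide

-- ===== VERDICT (by name: the statement is the Claim_ definition above) =====
theorem build_io_config_py_spec : Claim_equal_build_io_config_py := by
  intro bits _hdom hpre
  unfold Spec_build_io_config_py
  simp only [build_io_config_py, build_io_config_py_alt]
  -- A side: replace each group's ioc by pvMask, then unroll the dict construction
  rw [PySem.List.foldl_congr_mem (PySem.List.pyRange 0 38 1) _
      (fun rv i => if pvMask i.toNat (pvNorm bits) ≠ 0 then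
          rv.insert ("IOCONF_VAL_" ++ PySem.Int.toStr i) (hex4 (pvMask i.toNat (pvNorm bits))) else rv)
      PySem.Dict.empty
      (fun rv i hi => by rw [pv_ioc_eq bits hpre i hi])]
  rw [pv_items_condfold (PySem.List.pyRange 0 38 1)
      (fun i => "IOCONF_VAL_" ++ PySem.Int.toStr i)
      (fun i => hex4 (pvMask i.toNat (pvNorm bits)))
      (fun i => pvMask i.toNat (pvNorm bits))
      PySem.Dict.empty
      (fun i _ => PySem.Dict.contains_empty _)
      pv_keys_nodup]
  -- B side: the loop computes the 38 group masks, and the comprehension lists the nonzero ones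
  rw [pvB_init, pvB_fold bits hpre [], pv_enum_mapRange]
  simp only [List.nil_append]
  rw [show (38 : Int) = ((38 : Nat) : Int) by norm_num, PySem.List.pyRange_zero_natCast]
  rw [List.filter_map, List.filter_map, List.map_map, List.map_map]
  simp [Function.comp_def]
  rfl
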